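-- pv_equiv track=rewrite | github.com/pauuser/iu7-python-sem2 | lab2_main.py | it_is_a_number
-- ===== SOURCE A (Python) =====
-- def it_is_a_number(N):
--     saw_e = False  # переменная "встречи" e
--     saw_dot = False  # переменная "встречи" точки
--     ans = True  # ответ
--     if N == '':
--         ans = False
--     if N == 'e':
--         return False
--     for i in range(len(N)):
--         temp = ord(N[i])  # текущий символ проверяемого элемента
--         if (temp < 48 or temp > 57) and (temp != 101 and temp != 46
--                                          and temp != 45 and temp != 43):
--             # Если не число, не точка, минус, плюс или e
--             ans = False
--             break
--         elif temp == 101: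
--             if i == 0 or saw_e:
--                 # Выход, если e стоит первая или уже встречалось е
--                 ans = False
--                 break
--             saw_e = True
--         elif temp == 46:
--             if i == 0 or saw_e or saw_dot:
--                 # Выход, если запятая на первом месте или встречалось e
--                 ans = False
--                 break
--             saw_dot = True
--         elif (temp == 45) or (temp == 43):
--             # Минус может быть только в начале или сразу после e
--             if i == 0:
--                 continue
--             elif N[i - 1] == 'e':
--                 continue
--             else:
--                 ans = False
--                 break
--     return ans
-- ===== SOURCE B (Python) =====
-- def _digits_only(s):
--     return all('0' <= c <= '9' for c in s)
--
--
-- def _mantissa_ok(m):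
--     if m == '' or m[0] == '.':
--         return False
--     body = m[1:] if m[0] in '+-' else m
--     return all('0' <= c <= '9' or c == '.' for c in body) and body.count('.') <= 1
--
--
-- def _exponent_ok(ex):
--     body = ex[1:] if ex[:1] in ('+', '-') else ex
--     return _digits_only(body)
--
--
-- def it_is_a_number(N):
--     parts = N.split('e')
--     if len(parts) > 2:
--         return False
--     if not _mantissa_ok(parts[0]):
--         return False
--     return len(parts) == 1 or _exponent_ok(parts[1])
-- ===== Notes on version B (the rewrite author's own statement) =====
-- stated objective: alternative
-- what changed: A's single stateful character scan (flags saw_e/saw_dot plus previous-character checks) is replaced by splitting the string at the exponent marker and validating the mantissa part and the exponent part independently with simple shape checks.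
import Mathlib
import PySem

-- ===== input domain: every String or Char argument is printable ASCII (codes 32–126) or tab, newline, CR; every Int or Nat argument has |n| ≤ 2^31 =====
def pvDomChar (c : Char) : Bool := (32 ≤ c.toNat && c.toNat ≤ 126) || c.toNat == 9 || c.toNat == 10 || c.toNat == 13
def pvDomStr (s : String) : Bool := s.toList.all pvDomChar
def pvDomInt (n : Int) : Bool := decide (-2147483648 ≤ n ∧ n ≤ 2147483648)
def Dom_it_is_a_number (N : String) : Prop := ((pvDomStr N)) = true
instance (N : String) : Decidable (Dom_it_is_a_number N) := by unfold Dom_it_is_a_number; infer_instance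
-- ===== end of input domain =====

-- B re-implements the validator by splitting the string at the exponent marker and validating mantissa/exponent parts
-- separately (different decomposition, same cost); equal to A on every input.

-- ===== PORT A =====
-- the character-by-character scan of A: i is the index, prev the previous character,
-- sawE/sawDot the two flags; returning false transliterates `ans = False; break`
def pvALoop : List Char → Nat → Option Char → Bool → Bool → Bool
  | [], _, _, _, _ => true
  | c :: rest, i, prev, sawE, sawDot =>
    let temp := c.toNat
    if (temp < 48 ∨ 57 < temp) ∧ (temp ≠ 101 ∧ temp ≠ 46 ∧ temp ≠ 45 ∧ temp ≠ 43) then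
      false
    else if temp = 101 then
      if i = 0 ∨ sawE then false else pvALoop rest (i+1) (some c) true sawDot
    else if temp = 46 then
      if i = 0 ∨ sawE ∨ sawDot then false else pvALoop rest (i+1) (some c) sawE true
    else if temp = 45 ∨ temp = 43 then
      if i = 0 then pvALoop rest (i+1) (some c) sawE sawDot
      else if prev = some 'e' then pvALoop rest (i+1) (some c) sawE sawDot
      else false
    else pvALoop rest (i+1) (some c) sawE sawDot

def it_is_a_number (N : String) : Bool :=
  if N = "" then false
  else if N = "e" then false
  else pvALoop N.toList 0 none false false

-- ===== PORT B =====
def pvIsDig (c : Char) : Bool := '0' ≤ c && c ≤ '9'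

def pvDigitOrDot (c : Char) : Bool := pvIsDig c || c = '.'

def pvDigitsOnly (s : List Char) : Bool := s.all pvIsDig

def pvMantissaOk (m : List Char) : Bool :=
  match m with
  | [] => false
  | c :: rest =>
    if c = '.' then false
    else
      let body := if c = '+' ∨ c = '-' then rest else c :: rest
      body.all pvDigitOrDot && decide (body.count '.' ≤ 1)

def pvExponentOk (ex : List Char) : Bool :=
  let body :=
    match ex with
    | [] => ex
    | c :: rest => if c = '+' ∨ c = '-' then rest else ex
  pvDigitsOnly body

def it_is_a_number_alt (N : String) : Bool :=
  let parts := List.splitOn 'e' N.toList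
  if parts.length > 2 then false
  else if !pvMantissaOk (parts.headD []) then false
  else decide (parts.length = 1) || pvExponentOk (parts.getD 1 [])

-- ===== PRECONDITION & SPEC =====
def Spec_it_is_a_number (N : String) (out : Bool) : Prop := out = it_is_a_number_alt N
instance (N : String) (out : Bool) : Decidable (Spec_it_is_a_number N out) := by unfold Spec_it_is_a_number; infer_instance

-- ===== CLAIM (what is proved, stated in full; the proofs are below) =====
def Claim_equal_it_is_a_number : Prop := ∀ (N : String), Dom_it_is_a_number N → Spec_it_is_a_number N (it_is_a_number N)

-- ===== LEMMAS AND PROOFS =====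

-- character-code bridges between A's `ord` tests and B's character tests
theorem pvToNat_inj {c d : Char} (h : c.toNat = d.toNat) : c = d :=
  Char.ext (UInt32.toNat_inj.mp h)

theorem pvEq46 (c : Char) : c.toNat = 46 ↔ c = '.' :=
  ⟨fun h => pvToNat_inj (h.trans rfl), fun h => by subst h; rfl⟩

theorem pvEq101 (c : Char) : c.toNat = 101 ↔ c = 'e' :=
  ⟨fun h => pvToNat_inj (h.trans rfl), fun h => by subst h; rfl⟩

theorem pvEq45 (c : Char) : c.toNat = 45 ↔ c = '-' :=
  ⟨fun h => pvToNat_inj (h.trans rfl), fun h => by subst h; rfl⟩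

theorem pvEq43 (c : Char) : c.toNat = 43 ↔ c = '+' :=
  ⟨fun h => pvToNat_inj (h.trans rfl), fun h => by subst h; rfl⟩

theorem pvIsDig_iff (c : Char) : pvIsDig c = true ↔ (48 ≤ c.toNat ∧ c.toNat ≤ 57) := by
  unfold pvIsDig
  rw [Bool.and_eq_true, decide_eq_true_iff, decide_eq_true_iff,
    Char.le_def, Char.le_def, UInt32.le_iff_toNat_le, UInt32.le_iff_toNat_le]
  exact Iff.rfl

-- the mantissa-tail state of A's scan, as a function of the remaining characters and sawDot
def pvTailOk : Bool → List Char → Bool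
  | _, [] => true
  | d, c :: r =>
    if pvIsDig c then pvTailOk d r
    else if c = '.' then !d && pvTailOk true r
    else if c = 'e' then pvExponentOk r
    else false

-- A's scan after e with a non-'e' previous character accepts exactly digits
theorem pvLoopDig (r : List Char) : ∀ (i : Nat) (p : Char) (d : Bool), p ≠ 'e' →
    pvALoop r (i+1) (some p) true d = pvDigitsOnly r := by
  induction r with
  | nil => intro i p d _; rfl
  | cons c r ih =>
    intro i p d hp
    by_cases hd : pvIsDig c = true
    · obtain ⟨h1, h2⟩ := (pvIsDig_iff c).mp hd
      have hc : c ≠ 'e' := fun h => by subst h; exact absurd hd (by decide)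
      simp only [pvALoop]
      rw [if_neg (by omega), if_neg (by omega), if_neg (by omega), if_neg (by omega)]
      simp [ih (i+1) c d hc, pvDigitsOnly, hd]
    · by_cases h101 : c = 'e'
      · subst h101
        simp only [pvALoop]
        rw [if_neg (by decide), if_pos (by decide)]
        simp [pvDigitsOnly, pvIsDig]
      · by_cases h46 : c = '.'
        · subst h46
          simp only [pvALoop]
          rw [if_neg (by decide), if_neg (by decide), if_pos (by decide)]
          simp [pvDigitsOnly, pvIsDig]
        · by_cases h45 : c = '-' ∨ c = '+'
          · have ht : c.toNat = 45 ∨ c.toNat = 43 := by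
              rcases h45 with h | h <;> subst h <;> simp
            simp only [pvALoop]
            rw [if_neg (by omega), if_neg (by omega), if_neg (by omega), if_pos ht,
              if_neg (by omega), if_neg (by simp [hp])]
            have hdf : pvIsDig c = false := Bool.eq_false_iff.mpr hd
            simp [pvDigitsOnly, hdf]
          · push_neg at h45
            have hn : ¬(48 ≤ c.toNat ∧ c.toNat ≤ 57) := fun h => hd ((pvIsDig_iff c).mpr h)
            have t101 : c.toNat ≠ 101 := fun h => h101 ((pvEq101 c).mp h)
            have t46 : c.toNat ≠ 46 := fun h => h46 ((pvEq46 c).mp h)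
            have t45 : c.toNat ≠ 45 := fun h => h45.1 ((pvEq45 c).mp h)
            have t43 : c.toNat ≠ 43 := fun h => h45.2 ((pvEq43 c).mp h)
            simp only [pvALoop]
            rw [if_pos (by omega)]
            have hdf : pvIsDig c = false := Bool.eq_false_iff.mpr hd
            simp [pvDigitsOnly, hdf]

-- A's scan right after the 'e' accepts exactly an optional sign followed by digits
theorem pvLoopExp (r : List Char) (i : Nat) (d : Bool) :
    pvALoop r (i+1) (some 'e') true d = pvExponentOk r := by
  cases r with
  | nil => rfl
  | cons c r =>
    by_cases hd : pvIsDig c = true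
    · obtain ⟨h1, h2⟩ := (pvIsDig_iff c).mp hd
      have hc : c ≠ 'e' := fun h => by subst h; exact absurd hd (by decide)
      simp only [pvALoop]
      rw [if_neg (by omega), if_neg (by omega), if_neg (by omega), if_neg (by omega)]
      rw [pvLoopDig r (i+1) c d hc]
      have hsign : ¬(c = '+' ∨ c = '-') := by
        rintro (h | h) <;> subst h <;> exact absurd hd (by decide)
      simp [pvExponentOk, hsign, pvDigitsOnly, hd]
    · by_cases h101 : c = 'e'
      · subst h101
        simp only [pvALoop]
        rw [if_neg (by decide), if_pos (by decide)]
        simp [pvExponentOk, pvDigitsOnly, pvIsDig]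
      · by_cases h46 : c = '.'
        · subst h46
          simp only [pvALoop]
          rw [if_neg (by decide), if_neg (by decide), if_pos (by decide)]
          simp [pvExponentOk, pvDigitsOnly, pvIsDig]
        · by_cases h45 : c = '-' ∨ c = '+'
          · have ht : c.toNat = 45 ∨ c.toNat = 43 := by
              rcases h45 with h | h <;> subst h <;> simp
            have hc : c ≠ 'e' := by rcases h45 with h | h <;> subst h <;> decide
            simp only [pvALoop]
            rw [if_neg (by omega), if_neg (by omega), if_neg (by omega), if_pos ht,
              if_neg (by omega), if_pos (by decide)]
            rw [pvLoopDig r (i+1) c d hc]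
            have hsign : c = '+' ∨ c = '-' := h45.symm
            simp [pvExponentOk, hsign]
          · push_neg at h45
            have hn : ¬(48 ≤ c.toNat ∧ c.toNat ≤ 57) := fun h => hd ((pvIsDig_iff c).mpr h)
            have t101 : c.toNat ≠ 101 := fun h => h101 ((pvEq101 c).mp h)
            have t46 : c.toNat ≠ 46 := fun h => h46 ((pvEq46 c).mp h)
            have t45 : c.toNat ≠ 45 := fun h => h45.1 ((pvEq45 c).mp h)
            have t43 : c.toNat ≠ 43 := fun h => h45.2 ((pvEq43 c).mp h)
            simp only [pvALoop]
            rw [if_pos (by omega)]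
            have hdf : pvIsDig c = false := Bool.eq_false_iff.mpr hd
            have hsign : ¬(c = '+' ∨ c = '-') := fun h => h.elim h45.2 h45.1
            simp [pvExponentOk, hsign, pvDigitsOnly, hdf]

-- A's scan in the mantissa (past index 0, previous character not 'e') is pvTailOk
theorem pvLoopTail (r : List Char) : ∀ (i : Nat) (p : Char) (d : Bool), p ≠ 'e' →
    pvALoop r (i+1) (some p) false d = pvTailOk d r := by
  induction r with
  | nil => intro i p d _; rfl
  | cons c r ih =>
    intro i p d hp
    by_cases hd : pvIsDig c = true
    · obtain ⟨h1, h2⟩ := (pvIsDig_iff c).mp hd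
      have hc : c ≠ 'e' := fun h => by subst h; exact absurd hd (by decide)
      simp only [pvALoop]
      rw [if_neg (by omega), if_neg (by omega), if_neg (by omega), if_neg (by omega)]
      simp [ih (i+1) c d hc, pvTailOk, hd]
    · by_cases h101 : c = 'e'
      · subst h101
        simp only [pvALoop]
        rw [if_neg (by decide), if_pos (by decide), if_neg (by simp)]
        rw [pvLoopExp r (i+1) d]
        simp [pvTailOk, pvIsDig]
      · by_cases h46 : c = '.'
        · subst h46
          simp only [pvALoop]
          rw [if_neg (by decide), if_neg (by decide), if_pos (by decide)]
          cases d with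
          | false =>
            rw [if_neg (by simp)]
            rw [ih (i+1) '.' true (by decide)]
            simp [pvTailOk, pvIsDig]
          | true =>
            rw [if_pos (by simp)]
            simp [pvTailOk, pvIsDig]
        · by_cases h45 : c = '-' ∨ c = '+'
          · have ht : c.toNat = 45 ∨ c.toNat = 43 := by
              rcases h45 with h | h <;> subst h <;> simp
            have hdf : pvIsDig c = false := Bool.eq_false_iff.mpr hd
            have hce : c ≠ 'e' := by rcases h45 with h | h <;> subst h <;> decide
            simp only [pvALoop]
            rw [if_neg (by omega), if_neg (by omega), if_neg (by omega), if_pos ht,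
              if_neg (by omega), if_neg (by simp [hp])]
            simp [pvTailOk, hdf, h46, hce]
          · push_neg at h45
            have hn : ¬(48 ≤ c.toNat ∧ c.toNat ≤ 57) := fun h => hd ((pvIsDig_iff c).mpr h)
            have t101 : c.toNat ≠ 101 := fun h => h101 ((pvEq101 c).mp h)
            have t46 : c.toNat ≠ 46 := fun h => h46 ((pvEq46 c).mp h)
            have t45 : c.toNat ≠ 45 := fun h => h45.1 ((pvEq45 c).mp h)
            have t43 : c.toNat ≠ 43 := fun h => h45.2 ((pvEq43 c).mp h)
            simp only [pvALoop]
            rw [if_pos (by omega)]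
            have hdf : pvIsDig c = false := Bool.eq_false_iff.mpr hd
            simp [pvTailOk, hdf, h46, h101]

-- an exponent part still containing an 'e' never validates
theorem pvExpFalse (r : List Char) (h : 'e' ∈ r) : pvExponentOk r = false := by
  cases r with
  | nil => simp at h
  | cons c r =>
    by_cases hs : c = '+' ∨ c = '-'
    · have hce : c ≠ 'e' := by rcases hs with h' | h' <;> subst h' <;> decide
      have hr : 'e' ∈ r := by
        rcases List.mem_cons.mp h with h' | h'
        · exact absurd h'.symm hce
        · exact h'
      simp only [pvExponentOk, if_pos hs, pvDigitsOnly]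
      exact List.all_eq_false.mpr ⟨'e', hr, by decide⟩
    · simp only [pvExponentOk, if_neg hs, pvDigitsOnly]
      exact List.all_eq_false.mpr ⟨'e', h, by decide⟩

-- pvTailOk on an 'e'-free tail: digits and dots within the dot budget
theorem pvTailOkNoE (r : List Char) : ∀ (d : Bool), 'e' ∉ r →
    pvTailOk d r = (r.all pvDigitOrDot && decide (r.count '.' + (if d then 1 else 0) ≤ 1)) := by
  induction r with
  | nil => intro d _; cases d <;> rfl
  | cons c r ih =>
    intro d h
    have hce : c ≠ 'e' := fun h' => h (h' ▸ List.mem_cons_self)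
    have hr : 'e' ∉ r := fun h' => h (List.mem_cons_of_mem _ h')
    by_cases hd : pvIsDig c = true
    · have hc46 : c ≠ '.' := fun h' => by subst h'; exact absurd hd (by decide)
      simp [pvTailOk, hd, ih d hr, pvDigitOrDot, List.count_cons, hc46]
    · by_cases h46 : c = '.'
      · subst h46
        cases d with
        | false =>
          simp [pvTailOk, Bool.eq_false_iff.mpr hd, ih true hr, pvDigitOrDot,
            List.count_cons]
        | true => simp [pvTailOk, Bool.eq_false_iff.mpr hd, List.count_cons]
      · simp [pvTailOk, Bool.eq_false_iff.mpr hd, h46, hce, pvDigitOrDot]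

-- pvTailOk across the first 'e': e-free mantissa rest, then the exponent check
theorem pvTailOkSplit (m : List Char) : ∀ (r : List Char) (d : Bool), 'e' ∉ m →
    pvTailOk d (m ++ 'e' :: r) =
      ((m.all pvDigitOrDot && decide (m.count '.' + (if d then 1 else 0) ≤ 1)) && pvExponentOk r) := by
  induction m with
  | nil =>
    intro r d _
    cases d <;> simp [pvTailOk, pvIsDig]
  | cons c m ih =>
    intro r d h
    have hce : c ≠ 'e' := fun h' => h (h' ▸ List.mem_cons_self)
    have hm : 'e' ∉ m := fun h' => h (List.mem_cons_of_mem _ h')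
    by_cases hd : pvIsDig c = true
    · have hc46 : c ≠ '.' := fun h' => by subst h'; exact absurd hd (by decide)
      simp [pvTailOk, hd, ih r d hm, pvDigitOrDot, List.count_cons, hc46, Bool.and_assoc]
    · by_cases h46 : c = '.'
      · subst h46
        cases d with
        | false =>
          simp [pvTailOk, Bool.eq_false_iff.mpr hd, ih r true hm, pvDigitOrDot,
            List.count_cons, Bool.and_assoc]
        | true => simp [pvTailOk, Bool.eq_false_iff.mpr hd, List.count_cons]
      · simp [pvTailOk, Bool.eq_false_iff.mpr hd, h46, hce, pvDigitOrDot]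

-- splitting facts for List.splitOn with a single separator
theorem pvSplitPNoE (l : List Char) (h : 'e' ∉ l) :
    List.splitOnP (fun x => x == 'e') l = [l] := by
  induction l with
  | nil => rfl
  | cons c t ih =>
    have hce : c ≠ 'e' := fun h' => h (h' ▸ List.mem_cons_self)
    have ht : 'e' ∉ t := fun h' => h (List.mem_cons_of_mem _ h')
    rw [List.splitOnP_cons, if_neg (by simp [hce]), ih ht]
    rfl

theorem pvSplitNoE (l : List Char) (h : 'e' ∉ l) : List.splitOn 'e' l = [l] := by
  unfold List.splitOn
  exact pvSplitPNoE l h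

theorem pvSplitPFirst (m : List Char) : ∀ (r : List Char), 'e' ∉ m →
    List.splitOnP (fun x => x == 'e') (m ++ 'e' :: r) =
      m :: List.splitOnP (fun x => x == 'e') r := by
  induction m with
  | nil => intro r _; rw [List.nil_append, List.splitOnP_cons, if_pos (by simp)]
  | cons c m ih =>
    intro r h
    have hce : c ≠ 'e' := fun h' => h (h' ▸ List.mem_cons_self)
    have hm : 'e' ∉ m := fun h' => h (List.mem_cons_of_mem _ h')
    rw [List.cons_append, List.splitOnP_cons, if_neg (by simp [hce]), ih r hm]
    rfl

theorem pvSplitFirst (m r : List Char) (h : 'e' ∉ m) :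
    List.splitOn 'e' (m ++ 'e' :: r) = m :: List.splitOn 'e' r := by
  unfold List.splitOn
  exact pvSplitPFirst m r h

theorem pvSplitPLen (r : List Char) (h : 'e' ∈ r) :
    2 ≤ (List.splitOnP (fun x => x == 'e') r).length := by
  induction r with
  | nil => simp at h
  | cons c t ih =>
    by_cases hc : c = 'e'
    · rw [List.splitOnP_cons, if_pos (by simp [hc])]
      have h1 := List.splitOnP_ne_nil (fun x => x == 'e') t
      cases h' : List.splitOnP (fun x => x == 'e') t with
      | nil => exact absurd h' h1
      | cons a b => simp
    · have ht : 'e' ∈ t := by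
        rcases List.mem_cons.mp h with h' | h'
        · exact absurd h'.symm hc
        · exact h'
      rw [List.splitOnP_cons, if_neg (by simp [hc]), List.length_modifyHead]
      exact ih ht

theorem pvSplitLen (r : List Char) (h : 'e' ∈ r) : 2 ≤ (List.splitOn 'e' r).length := by
  unfold List.splitOn
  exact pvSplitPLen r h


theorem pvFirstE (l : List Char) (h : 'e' ∈ l) : ∃ m r, l = m ++ 'e' :: r ∧ 'e' ∉ m := by
  induction l with
  | nil => simp at h
  | cons c t ih =>
    by_cases hc : c = 'e'
    · exact ⟨[], t, by simp [hc], by simp⟩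
    · obtain ⟨m, r, hmr, hm⟩ := ih (by
        rcases List.mem_cons.mp h with h' | h'
        · exact absurd h'.symm hc
        · exact h')
      refine ⟨c :: m, r, by simp [hmr], ?_⟩
      intro hmem
      rcases List.mem_cons.mp hmem with h' | h'
      · exact hc h'.symm
      · exact hm h'

-- the head step of A's scan (index 0, no previous character)
theorem pvHeadStep (c : Char) (rest : List Char) :
    pvALoop (c :: rest) 0 none false false =
      (if pvIsDig c ∨ c = '-' ∨ c = '+' then pvTailOk false rest else false) := by
  by_cases hd : pvIsDig c = true
  · obtain ⟨h1, h2⟩ := (pvIsDig_iff c).mp hd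
    have hc : c ≠ 'e' := fun h => by subst h; exact absurd hd (by decide)
    simp only [pvALoop]
    rw [if_neg (by omega), if_neg (by omega), if_neg (by omega), if_neg (by omega)]
    rw [pvLoopTail rest 0 c false hc, if_pos (Or.inl hd)]
  · by_cases h101 : c = 'e'
    · subst h101
      simp only [pvALoop]
      rw [if_neg (by decide), if_pos (by decide), if_pos (by simp)]
      rw [if_neg (by rintro (h | h | h) <;> simp_all [pvIsDig])]
    · by_cases h46 : c = '.'
      · subst h46
        simp only [pvALoop]
        rw [if_neg (by decide), if_neg (by decide), if_pos (by decide), if_pos (by simp)]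
        rw [if_neg (by rintro (h | h | h) <;> simp_all [pvIsDig])]
      · by_cases h45 : c = '-' ∨ c = '+'
        · have ht : c.toNat = 45 ∨ c.toNat = 43 := by
            rcases h45 with h | h <;> subst h <;> simp
          have hce : c ≠ 'e' := by rcases h45 with h | h <;> subst h <;> decide
          simp only [pvALoop]
          rw [if_neg (by omega), if_neg (by omega), if_neg (by omega), if_pos ht, if_pos (by decide)]
          rw [pvLoopTail rest 0 c false hce, if_pos (Or.inr h45)]
        · push_neg at h45
          have hn : ¬(48 ≤ c.toNat ∧ c.toNat ≤ 57) := fun h => hd ((pvIsDig_iff c).mpr h)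
          have t101 : c.toNat ≠ 101 := fun h => h101 ((pvEq101 c).mp h)
          have t46 : c.toNat ≠ 46 := fun h => h46 ((pvEq46 c).mp h)
          have t45 : c.toNat ≠ 45 := fun h => h45.1 ((pvEq45 c).mp h)
          have t43 : c.toNat ≠ 43 := fun h => h45.2 ((pvEq43 c).mp h)
          simp only [pvALoop]
          rw [if_pos (by omega)]
          rw [if_neg ?_]
          rintro (h | h | h)
          · exact hd h
          · exact h45.1 h
          · exact h45.2 h

-- B's head check on a cons cell, given an accepted/rejected first character
theorem pvMantissaChar (c : Char) (rest : List Char)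
    (hok : pvIsDig c = true ∨ c = '-' ∨ c = '+') :
    pvMantissaOk (c :: rest) = (rest.all pvDigitOrDot && decide (rest.count '.' ≤ 1)) := by
  rcases hok with hd | hs | hs
  · have hc46 : c ≠ '.' := fun h' => by subst h'; exact absurd hd (by decide)
    have hsign : ¬(c = '+' ∨ c = '-') := by
      rintro (h | h) <;> subst h <;> exact absurd hd (by decide)
    have hdd : pvDigitOrDot c = true := by simp [pvDigitOrDot, hd]
    simp [pvMantissaOk, hc46, hsign, List.all_cons, hdd, List.count_cons]
  · subst hs; simp [pvMantissaOk]
  · subst hs; simp [pvMantissaOk]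

theorem pvMantissaFalse (c : Char) (rest : List Char)
    (hok : ¬(pvIsDig c = true ∨ c = '-' ∨ c = '+')) :
    pvMantissaOk (c :: rest) = false := by
  have hd : pvIsDig c = false := Bool.eq_false_iff.mpr (fun h => hok (Or.inl h))
  have hm : c ≠ '-' := fun h => hok (Or.inr (Or.inl h))
  have hp : c ≠ '+' := fun h => hok (Or.inr (Or.inr h))
  by_cases h46 : c = '.'
  · simp [pvMantissaOk, h46]
  · have hsign : ¬(c = '+' ∨ c = '-') := by
      rintro (h | h)
      · exact hp h
      · exact hm h
    have hdd : pvDigitOrDot c = false := by simp [pvDigitOrDot, hd, h46]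
    simp [pvMantissaOk, h46, hsign, List.all_cons, hdd]

-- B's outer structure evaluated on one, two, and three-or-more parts
theorem pvAltOne (m : List Char) :
    (if ([m] : List (List Char)).length > 2 then false
     else if !pvMantissaOk (([m] : List (List Char)).headD []) then false
     else decide (([m] : List (List Char)).length = 1)
       || pvExponentOk (([m] : List (List Char)).getD 1 [])) = pvMantissaOk m := by
  by_cases h : pvMantissaOk m = true <;> simp [h]

theorem pvAltTwo (m r : List Char) :
    (if ([m, r] : List (List Char)).length > 2 then false
     else if !pvMantissaOk (([m, r] : List (List Char)).headD []) then false
     else decide (([m, r] : List (List Char)).length = 1)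
       || pvExponentOk (([m, r] : List (List Char)).getD 1 [])) =
      (pvMantissaOk m && pvExponentOk r) := by
  by_cases h : pvMantissaOk m = true <;> simp [h]

theorem pvAltMany (m : List Char) (ps : List (List Char)) (h : 2 ≤ ps.length) :
    (if (m :: ps).length > 2 then false
     else if !pvMantissaOk ((m :: ps).headD []) then false
     else decide ((m :: ps).length = 1) || pvExponentOk ((m :: ps).getD 1 [])) = false := by
  rw [if_pos (by rw [List.length_cons]; omega)]

-- the two sides agree on every string
theorem pvMain (N : String) : it_is_a_number N = it_is_a_number_alt N := by
  by_cases h0 : N = ""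
  · subst h0; decide
  by_cases h1 : N = "e"
  · subst h1; decide
  have hl : N.toList ≠ [] := fun h => h0 (String.toList_inj.mp (by simp [h]))
  rw [it_is_a_number, if_neg h0, if_neg h1, it_is_a_number_alt]
  cases hN : N.toList with
  | nil => exact absurd hN hl
  | cons c rest =>
    rw [pvHeadStep]
    by_cases he : 'e' ∈ c :: rest
    · obtain ⟨m, r, hmr, hm⟩ := pvFirstE _ he
      cases m with
      | nil =>
        obtain ⟨hc, hrest⟩ : c = 'e' ∧ rest = r := by simpa using hmr
        subst hc
        rw [if_neg (by decide), hrest]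
        rw [show ('e' :: r : List Char) = [] ++ 'e' :: r from rfl,
          pvSplitFirst [] r (by simp)]
        by_cases her : 'e' ∈ r
        · rw [pvAltMany [] _ (pvSplitLen r her)]
        · rw [pvSplitNoE r her, pvAltTwo]
          simp [pvMantissaOk]
      | cons c' m' =>
        obtain ⟨hc, hrest⟩ : c = c' ∧ rest = m' ++ 'e' :: r := by simpa using hmr
        rw [← hc] at hm
        subst hrest
        have hme : 'e' ∉ m' := fun h => hm (List.mem_cons_of_mem _ h)
        rw [show (c :: (m' ++ 'e' :: r) : List Char) = (c :: m') ++ 'e' :: r from rfl,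
          pvSplitFirst (c :: m') r hm]
        by_cases her : 'e' ∈ r
        · rw [pvAltMany _ _ (pvSplitLen r her)]
          by_cases hok : pvIsDig c = true ∨ c = '-' ∨ c = '+'
          · rw [if_pos hok, pvTailOkSplit m' r false hme, pvExpFalse r her]
            simp
          · rw [if_neg hok]
        · rw [pvSplitNoE r her, pvAltTwo]
          by_cases hok : pvIsDig c = true ∨ c = '-' ∨ c = '+'
          · rw [if_pos hok, pvTailOkSplit m' r false hme, pvMantissaChar c m' hok]
            simp
          · rw [if_neg hok, pvMantissaFalse c m' hok]
            simp
    · rw [pvSplitNoE _ he, pvAltOne]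
      have hre : 'e' ∉ rest := fun h => he (List.mem_cons_of_mem _ h)
      by_cases hok : pvIsDig c = true ∨ c = '-' ∨ c = '+'
      · rw [if_pos hok, pvTailOkNoE rest false hre, pvMantissaChar c rest hok]
        simp
      · rw [if_neg hok, pvMantissaFalse c rest hok]


-- ===== VERDICT (by name: the statement is the Claim_ definition above) =====
theorem it_is_a_number_spec : Claim_equal_it_is_a_number := by
  intro N _
  exact pvMain N
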